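-- pv_equiv track=rewrite | github.com/avielchow/Codejam | Universe.py | damagedone
-- ===== SOURCE A (Python) =====
-- def damagedone(prog):
--     currentpower = 1
--     damage = 0
--     for action in prog:
--         if action == 'C':
--             currentpower = currentpower * 2
--         else:
--             damage += currentpower
--     return damage
-- ===== SOURCE B (Python) =====
-- def damagedone(prog):
--     # Fold in reverse: a charge doubles the damage of everything after it.
--     d = 0
--     for action in reversed(prog):
--         if action == 'C':
--             d = d * 2
--         else:
--             d = d + 1
--     return d
-- ===== Notes on version B (the rewrite author's own statement) =====
-- stated objective: alternative
-- what changed: Replaces the forward pass with a currentpower/damage pair by a reverse pass with a single accumulator: each 'C' doubles the combined damage of all later shots.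
import Mathlib
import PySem

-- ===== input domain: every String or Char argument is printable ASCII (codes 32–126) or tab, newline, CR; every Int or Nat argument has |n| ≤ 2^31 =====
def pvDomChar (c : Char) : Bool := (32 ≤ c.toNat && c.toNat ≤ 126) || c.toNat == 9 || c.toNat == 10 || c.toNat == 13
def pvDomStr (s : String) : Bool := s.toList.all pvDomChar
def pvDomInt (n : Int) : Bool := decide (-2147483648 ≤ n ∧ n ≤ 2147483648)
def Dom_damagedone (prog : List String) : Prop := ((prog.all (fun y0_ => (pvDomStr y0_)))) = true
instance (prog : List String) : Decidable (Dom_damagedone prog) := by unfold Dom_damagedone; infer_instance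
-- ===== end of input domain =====

-- B folds the program in reverse with a single accumulator (each 'C' doubles later damage),
-- replacing A's forward pass with a (currentpower, damage) pair; same O(n) cost.


-- ===== PORT A =====
-- forward loop carrying (currentpower, damage)
def damagedone (prog : List String) : Int :=
  (prog.foldl (fun (st : Int × Int) action =>
      if action = "C" then (st.1 * 2, st.2) else (st.1, st.2 + st.1))
    (1, 0)).2

-- ===== PORT B =====
-- reverse loop with a single accumulator d
def damagedone_alt (prog : List String) : Int :=
  prog.reverse.foldl (fun (d : Int) action =>
      if action = "C" then d * 2 else d + 1) 0

-- ===== PRECONDITION & SPEC =====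
def Spec_damagedone (prog : List String) (out : Int) : Prop := out = damagedone_alt prog
instance (prog : List String) (out : Int) : Decidable (Spec_damagedone prog out) := by unfold Spec_damagedone; infer_instance

-- ===== CLAIM (what is proved, stated in full; the proofs are below) =====
def Claim_equal_damagedone : Prop := ∀ (prog : List String), Dom_damagedone prog → Spec_damagedone prog (damagedone prog)

-- ===== LEMMAS AND PROOFS =====

-- B's reverse foldl is a foldr
lemma alt_eq_foldr (prog : List String) :
    damagedone_alt prog =
      prog.foldr (fun action d => if action = "C" then d * 2 else d + 1) 0 := by
  simp [damagedone_alt, List.foldl_reverse]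

-- A's loop invariant: final damage = d + p * (B's value for the rest)
lemma a_invariant (prog : List String) (p d : Int) :
    (prog.foldl (fun (st : Int × Int) action =>
        if action = "C" then (st.1 * 2, st.2) else (st.1, st.2 + st.1)) (p, d)).2
      = d + p * prog.foldr (fun action d => if action = "C" then d * 2 else d + 1) 0 := by
  induction prog generalizing p d with
  | nil => simp
  | cons a l ih =>
    by_cases h : a = "C" <;> simp [h, ih] <;> ring

-- ===== VERDICT (by name: the statement is the Claim_ definition above) =====
theorem damagedone_spec : Claim_equal_damagedone := by
  intro prog _
  unfold Spec_damagedone damagedone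
  rw [alt_eq_foldr, a_invariant]
  ring
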